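-- pv_equiv track=rewrite | github.com/xpqz/aoc-18 | day22.py | geo_index
-- ===== SOURCE A (Python) =====
-- def geo_index(pos, target, depth):
--     vals = {(0, 0): 0, target: 0}
--     for y in range(0, pos[1]+1):
--         for x in range(0, pos[0]+1):
--             this = (x, y)
--             if this == target:
--                 continue
--             if this[1] == 0:
--                 vals[this] = this[0] * 16807
--             elif this[0] == 0:
--                 vals[this] = this[1] * 48271
--             else:
--                 vals[this] = (
--                     (vals[(this[0]-1, this[1])] + depth) % 20183 *
--                     (vals[(this[0], this[1]-1)] + depth) % 20183
--                 )
--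
--     return vals[pos]
-- ===== SOURCE B (Python) =====
-- def geo_index(pos, target, depth):
--     # Anti-diagonal wavefront DP: process cells in order of x+y; each cell's two
--     # dependencies lie on the previous diagonal, so only one diagonal (keyed by x)
--     # is kept instead of the whole grid.
--     px, py = pos
--     prev = {}
--     for s in range(px + py + 1):
--         cur = {}
--         for x in range(max(0, s - py), min(px, s) + 1):
--             y = s - x
--             if (x, y) == target:
--                 cur[x] = 0
--             elif y == 0:
--                 cur[x] = x * 16807
--             elif x == 0:
--                 cur[x] = y * 48271
--             else:
--                 cur[x] = (prev[x - 1] + depth) % 20183 * (prev[x] + depth) % 20183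
--         prev = cur
--     return prev[px]
-- ===== Notes on version B (the rewrite author's own statement) =====
-- stated objective: alternative
-- what changed: Replaces A's row-major fill of a whole-grid tuple-keyed dict by an anti-diagonal wavefront DP: cells are processed in order of x+y, both dependencies of a cell lie on the previous diagonal, so only one diagonal (a dict keyed by x) is kept; correctness rests on the traversal order not mattering for this recurrence.
-- outside the precondition, e.g. on geo_index((-2, -3), (-2, -3), 5): A returns 0, B raises KeyError
import Mathlib
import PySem

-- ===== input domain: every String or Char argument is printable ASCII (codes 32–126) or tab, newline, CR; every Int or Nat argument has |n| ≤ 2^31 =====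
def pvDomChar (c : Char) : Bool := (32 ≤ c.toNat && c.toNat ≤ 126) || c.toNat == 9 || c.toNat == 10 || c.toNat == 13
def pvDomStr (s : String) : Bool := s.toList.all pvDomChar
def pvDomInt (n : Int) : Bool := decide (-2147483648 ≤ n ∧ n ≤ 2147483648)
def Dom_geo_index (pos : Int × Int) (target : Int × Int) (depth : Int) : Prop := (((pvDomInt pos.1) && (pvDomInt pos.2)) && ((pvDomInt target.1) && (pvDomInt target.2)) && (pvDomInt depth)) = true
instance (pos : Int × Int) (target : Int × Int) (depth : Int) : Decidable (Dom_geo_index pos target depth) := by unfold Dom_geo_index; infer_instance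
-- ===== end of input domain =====

-- B replaces A's row-major fill of a whole-grid dict by an anti-diagonal wavefront
-- DP keeping only the previous diagonal keyed by x (objective: alternative).

-- ===== PORT A =====
-- the inner loop body of A (dict lookups vals[k] ported as getD with default 0:
-- under Pre_ every looked-up key is present, so the default is never used)
def aInner (target : Int × Int) (depth : Int) (y : Int)
    (vals : Std.HashMap (Int × Int) Int) (x : Int) : Std.HashMap (Int × Int) Int :=
  let this := (x, y)
  if this = target then vals
  else if this.2 = 0 then vals.insert this (this.1 * 16807)
  else if this.1 = 0 then vals.insert this (this.2 * 48271)
  else vals.insert this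
    (PySem.Int.mod (PySem.Int.mod (vals.getD (this.1 - 1, this.2) 0 + depth) 20183 *
      (vals.getD (this.1, this.2 - 1) 0 + depth)) 20183)

def geo_index (pos : Int × Int) (target : Int × Int) (depth : Int) : Int :=
  let vals0 : Std.HashMap (Int × Int) Int := (((∅ : Std.HashMap (Int × Int) Int)).insert (0, 0) 0).insert target 0
  let vals := (PySem.List.pyRange 0 (pos.2 + 1) 1).foldl
    (fun vals y => (PySem.List.pyRange 0 (pos.1 + 1) 1).foldl (aInner target depth y) vals) vals0
  -- vals[pos]: present under Pre_
  vals.getD pos 0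

-- ===== PORT B =====
-- the inner loop body of B (prev[x-1], prev[x] ported as getD with default 0:
-- under Pre_ both keys are present on the previous diagonal)
def bCell (target : Int × Int) (depth : Int) (prev : Std.HashMap Int Int) (s : Int)
    (cur : Std.HashMap Int Int) (x : Int) : Std.HashMap Int Int :=
  let y := s - x
  if (x, y) = target then cur.insert x 0
  else if y = 0 then cur.insert x (x * 16807)
  else if x = 0 then cur.insert x (y * 48271)
  else cur.insert x
    (PySem.Int.mod (PySem.Int.mod (prev.getD (x - 1) 0 + depth) 20183 *
      (prev.getD x 0 + depth)) 20183)

def geo_index_alt (pos : Int × Int) (target : Int × Int) (depth : Int) : Int :=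
  let px := pos.1
  let py := pos.2
  let prev := (PySem.List.pyRange 0 (px + py + 1) 1).foldl
    (fun prev s => (PySem.List.pyRange (max 0 (s - py)) (min px s + 1) 1).foldl
      (bCell target depth prev s) (∅ : Std.HashMap Int Int)) (∅ : Std.HashMap Int Int)
  -- prev[px]: present under Pre_
  prev.getD px 0

-- ===== PRECONDITION & SPEC =====
-- Pre_ excludes pos with a negative coordinate: there A raises KeyError, except when
-- pos == target, where A returns the accidental pre-seeded sentinel 0 while B raises KeyError.
def Pre_geo_index (pos : Int × Int) (target : Int × Int) (depth : Int) : Prop :=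
  0 ≤ pos.1 ∧ 0 ≤ pos.2
instance (pos : Int × Int) (target : Int × Int) (depth : Int) : Decidable (Pre_geo_index pos target depth) := by unfold Pre_geo_index; infer_instance

def pvWitness_geo_index : (Int × Int) × (Int × Int) × Int := ((2, 2), (1, 1), 7)

def Spec_geo_index (pos : Int × Int) (target : Int × Int) (depth : Int) (out : Int) : Prop := out = geo_index_alt pos target depth
instance (pos : Int × Int) (target : Int × Int) (depth : Int) (out : Int) : Decidable (Spec_geo_index pos target depth out) := by unfold Spec_geo_index; infer_instance

-- ===== CLAIM (what is proved, stated in full; the proofs are below) =====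
def Claim_equal_geo_index : Prop := ∀ (pos : Int × Int) (target : Int × Int) (depth : Int), Dom_geo_index pos target depth → Pre_geo_index pos target depth → Spec_geo_index pos target depth (geo_index pos target depth)

-- ===== LEMMAS AND PROOFS =====

-- getD after insert, with a propositional condition (Std.HashMap.getD_insert uses '==')
lemma hmGetD_insert {α β : Type} [BEq α] [Hashable α] [LawfulBEq α] [LawfulHashable α]
    [DecidableEq α] (m : Std.HashMap α β) (k a : α) (v d : β) :
    (m.insert k v).getD a d = if a = k then v else m.getD a d := by
  rw [Std.HashMap.getD_insert]
  by_cases h : a = k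
  · simp [h]
  · have hk : ¬ k = a := fun hh => h hh.symm
    simp [hk, h]

-- the common mathematical value of cell (x, y)
def gval (target : Int × Int) (depth : Int) : Nat → Nat → Int
  | x, 0 => if ((x : Int), (0 : Int)) = target then 0 else (x : Int) * 16807
  | 0, Nat.succ y => if ((0 : Int), ((y : Int) + 1)) = target then 0 else ((y : Int) + 1) * 48271
  | Nat.succ x, Nat.succ y =>
      if (((x : Int) + 1, ((y : Int) + 1)) : Int × Int) = target then 0
      else PySem.Int.mod (PySem.Int.mod (gval target depth x (y + 1) + depth) 20183 *
        (gval target depth (x + 1) y + depth)) 20183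
  termination_by x y => x + y

lemma gval_eq (t : Int × Int) (d : Int) (X y : Nat) :
    gval t d X y =
      if ((X : Int), (y : Int)) = t then 0
      else if (y : Int) = 0 then (X : Int) * 16807
      else if (X : Int) = 0 then (y : Int) * 48271
      else PySem.Int.mod (PySem.Int.mod (gval t d (X - 1) y + d) 20183 *
        (gval t d X (y - 1) + d)) 20183 := by
  match X, y with
  | X, 0 => simp [gval]
  | 0, Nat.succ y =>
      simp [gval]; push_cast; ring_nf
      split_ifs <;> first | rfl | omega
  | Nat.succ X, Nat.succ y =>
      simp only [gval]
      push_cast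
      norm_num
      split_ifs <;> first | rfl | omega

lemma gval_target (t : Int × Int) (d : Int) (X y : Nat) (h : ((X : Int), (y : Int)) = t) :
    gval t d X y = 0 := by
  rw [gval_eq, if_pos h]

lemma aInner_step (t : Int × Int) (d : Int) (m y X : Nat)
    (vals : Std.HashMap (Int × Int) Int)
    (h1 : ∀ a b : Nat, a ≤ m → b < y → vals.getD ((a : Int), (b : Int)) 0 = gval t d a b)
    (h2 : ∀ a : Nat, a < X → vals.getD ((a : Int), (y : Int)) 0 = gval t d a y)
    (ht : vals.getD t 0 = 0) (hX : X ≤ m) :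
    (∀ a b : Nat, a ≤ m → b < y → (aInner t d y vals X).getD ((a : Int), (b : Int)) 0 = gval t d a b) ∧
    (∀ a : Nat, a < X + 1 → (aInner t d y vals X).getD ((a : Int), (y : Int)) 0 = gval t d a y) ∧
    (aInner t d y vals X).getD t 0 = 0 := by
  by_cases hT : (((X : Int)), ((y : Int))) = t
  · have hA : aInner t d (y : Int) vals (X : Int) = vals := by
      unfold aInner; simp [hT]
    rw [hA]
    refine ⟨h1, ?_, ht⟩
    intro a ha
    rcases Nat.lt_succ_iff_lt_or_eq.mp ha with h | h
    · exact h2 a h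
    · subst h; rw [hT, ht, gval_target t d a y hT]
  · have hA : aInner t d (y : Int) vals (X : Int) = vals.insert ((X : Int), (y : Int)) (gval t d X y) := by
      unfold aInner
      rw [gval_eq]
      by_cases hy : (y : Int) = 0
      · have hy0 : y = 0 := by exact_mod_cast hy
        subst hy0
        simp only [Nat.cast_zero] at hT ⊢
        simp [hT]
      · have hyn : y ≠ 0 := by omega
        by_cases hx : (X : Int) = 0
        · have hx0 : X = 0 := by exact_mod_cast hx
          subst hx0
          simp only [Nat.cast_zero] at hT ⊢
          simp [hT, hy, hyn]
        · have hxn : X ≠ 0 := by omega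
          have e1 : vals.getD ((X : Int) - 1, (y : Int)) 0 = gval t d (X - 1) y := by
            have hc : ((X : Int) - 1) = ((X - 1 : Nat) : Int) := by omega
            rw [hc]; exact h2 (X - 1) (by omega)
          have e2 : vals.getD ((X : Int), (y : Int) - 1) 0 = gval t d X (y - 1) := by
            have hc : ((y : Int) - 1) = ((y - 1 : Nat) : Int) := by omega
            rw [hc]; exact h1 X (y - 1) hX (by omega)
          simp [hT, hy, hx, hyn, hxn, e1, e2]
    rw [hA]
    refine ⟨?_, ?_, ?_⟩
    · intro a b ha hb
      rw [hmGetD_insert, if_neg (by simp [Prod.ext_iff]; omega)]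
      exact h1 a b ha hb
    · intro a ha
      rcases Nat.lt_succ_iff_lt_or_eq.mp ha with h | h
      · rw [hmGetD_insert, if_neg (by simp [Prod.ext_iff]; omega)]
        exact h2 a h
      · subst h
        rw [hmGetD_insert, if_pos rfl]
    · rw [hmGetD_insert, if_neg (fun h => hT h.symm)]
      exact ht

lemma aRow_fold (t : Int × Int) (d : Int) (m y : Nat) :
    ∀ (K X : Nat) (vals : Std.HashMap (Int × Int) Int), X + K = m + 1 →
    (∀ a b : Nat, a ≤ m → b < y → vals.getD ((a : Int), (b : Int)) 0 = gval t d a b) →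
    (∀ a : Nat, a < X → vals.getD ((a : Int), (y : Int)) 0 = gval t d a y) →
    vals.getD t 0 = 0 →
    (∀ a b : Nat, a ≤ m → b < y + 1 →
      ((PySem.List.pyRange (X : Int) ((m : Int) + 1) 1).foldl (aInner t d y) vals).getD ((a : Int), (b : Int)) 0 = gval t d a b) ∧
    ((PySem.List.pyRange (X : Int) ((m : Int) + 1) 1).foldl (aInner t d y) vals).getD t 0 = 0 := by
  intro K
  induction K with
  | zero =>
    intro X vals hXK h1 h2 ht
    have hX : X = m + 1 := by omega
    subst hX
    rw [PySem.List.pyRange_one_eq_nil (by push_cast; omega)]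
    simp only [List.foldl_nil]
    refine ⟨?_, ht⟩
    intro a b ha hb
    rcases Nat.lt_succ_iff_lt_or_eq.mp hb with h | h
    · exact h1 a b ha h
    · subst h; exact h2 a (by omega)
  | succ K ih =>
    intro X vals hXK h1 h2 ht
    have hXm : X ≤ m := by omega
    rw [PySem.List.pyRange_one_cons (by push_cast; omega)]
    simp only [List.foldl_cons]
    obtain ⟨g1, g2, g3⟩ := aInner_step t d m y X vals h1 h2 ht hXm
    have hc : ((X : Int) + 1) = ((X + 1 : Nat) : Int) := by push_cast; ring
    rw [hc]
    exact ih (X + 1) _ (by omega) g1 g2 g3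

lemma aOuter_fold (t : Int × Int) (d : Int) (m n : Nat) :
    ∀ (K Y : Nat) (vals : Std.HashMap (Int × Int) Int), Y + K = n + 1 →
    (∀ a b : Nat, a ≤ m → b < Y → vals.getD ((a : Int), (b : Int)) 0 = gval t d a b) →
    vals.getD t 0 = 0 →
    (∀ a b : Nat, a ≤ m → b < n + 1 →
      ((PySem.List.pyRange (Y : Int) ((n : Int) + 1) 1).foldl
        (fun vals y => (PySem.List.pyRange 0 ((m : Int) + 1) 1).foldl (aInner t d y) vals) vals).getD ((a : Int), (b : Int)) 0 = gval t d a b) := by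
  intro K
  induction K with
  | zero =>
    intro Y vals hYK h1 ht
    have hY : Y = n + 1 := by omega
    subst hY
    rw [PySem.List.pyRange_one_eq_nil (a := ((n + 1 : Nat) : Int)) (b := (n : Int) + 1) (by push_cast; exact le_rfl)]
    simp only [List.foldl_nil]
    exact h1
  | succ K ih =>
    intro Y vals hYK h1 ht
    rw [PySem.List.pyRange_one_cons (a := (Y : Int)) (b := (n : Int) + 1) (by push_cast; omega)]
    simp only [List.foldl_cons]
    obtain ⟨g1, g3⟩ :=
      aRow_fold t d m Y (m + 1) 0 vals (by omega) h1 (fun a ha => absurd ha (by omega)) ht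
    have hc : ((Y : Int) + 1) = ((Y + 1 : Nat) : Int) := by push_cast; ring
    rw [hc]
    exact ih (Y + 1) _ (by omega) g1 g3

lemma geo_index_eq_gval (t : Int × Int) (d : Int) (m n : Nat) :
    geo_index ((m : Int), (n : Int)) t d = gval t d m n := by
  unfold geo_index
  simp only []
  have h0 := aOuter_fold t d m n (n + 1) 0
    ((((∅ : Std.HashMap (Int × Int) Int)).insert ((0 : Int), (0 : Int)) 0).insert t 0) (by omega)
    (by intro a b ha hb; omega) (by rw [hmGetD_insert, if_pos rfl])
  exact h0 m n (le_refl m) (by omega)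

-- B side: the cell update inserts exactly gval
lemma bCell_eq (t : Int × Int) (d : Int) (m n s X : Nat)
    (prev cur : Std.HashMap Int Int)
    (hX1 : s - n ≤ X) (hX2 : X ≤ min m s)
    (hprev : ∀ a : Nat, s - 1 - n ≤ a → a ≤ min m (s - 1) → 1 ≤ s →
      prev.getD (a : Int) 0 = gval t d a (s - 1 - a)) :
    bCell t d prev (s : Int) cur (X : Int) = cur.insert (X : Int) (gval t d X (s - X)) := by
  have hXs : X ≤ s := by omega
  have hy : ((s - X : Nat) : Int) = (s : Int) - (X : Int) := by omega
  unfold bCell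
  rw [gval_eq, hy]
  by_cases hT : ((X : Int), (s : Int) - (X : Int)) = t
  · simp [hT]
  · by_cases hy0 : (s : Int) - (X : Int) = 0
    · simp [hy0]
      split_ifs <;> rfl
    · by_cases hx0 : (X : Int) = 0
      · simp [hT, hy0, hx0]
        split_ifs <;> rfl
      · have hX1' : 1 ≤ X := by omega
        have hy1 : X + 1 ≤ s := by omega
        have e1 : prev.getD ((X : Int) - 1) 0 = gval t d (X - 1) (s - X) := by
          have hc : ((X : Int) - 1) = ((X - 1 : Nat) : Int) := by omega
          rw [hc, hprev (X - 1) (by omega) (by omega) (by omega)]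
          congr 1
          omega
        have e2 : prev.getD (X : Int) 0 = gval t d X (s - X - 1) := by
          rw [hprev X (by omega) (by omega) (by omega)]
          congr 1
          omega
        simp [hT, hy0, e1, e2]
        split_ifs <;> rfl

lemma bDiag_fold (t : Int × Int) (d : Int) (m n s : Nat)
    (prev : Std.HashMap Int Int)
    (hprev : ∀ a : Nat, s - 1 - n ≤ a → a ≤ min m (s - 1) → 1 ≤ s →
      prev.getD (a : Int) 0 = gval t d a (s - 1 - a)) :
    ∀ (K X : Nat) (cur : Std.HashMap Int Int), s - n ≤ X → X + K = min m s + 1 →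
    (∀ a : Nat, s - n ≤ a → a < X → cur.getD (a : Int) 0 = gval t d a (s - a)) →
    (∀ a : Nat, s - n ≤ a → a ≤ min m s →
      ((PySem.List.pyRange (X : Int) (((min m s : Nat) : Int) + 1) 1).foldl
        (bCell t d prev (s : Int)) cur).getD (a : Int) 0 = gval t d a (s - a)) := by
  intro K
  induction K with
  | zero =>
    intro X cur hlo hXK hcur
    have hX : X = min m s + 1 := by omega
    subst hX
    rw [PySem.List.pyRange_one_eq_nil (by push_cast; omega)]
    simp only [List.foldl_nil]
    intro a ha1 ha2
    exact hcur a ha1 (by omega)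
  | succ K ih =>
    intro X cur hlo hXK hcur
    have hXm : X ≤ min m s := by omega
    rw [PySem.List.pyRange_one_cons (by push_cast; omega)]
    simp only [List.foldl_cons]
    rw [bCell_eq t d m n s X prev cur hlo hXm hprev]
    have hc : ((X : Int) + 1) = ((X + 1 : Nat) : Int) := by push_cast; ring
    rw [hc]
    refine ih (X + 1) _ (by omega) (by omega) ?_
    intro a ha1 ha2
    rcases Nat.lt_succ_iff_lt_or_eq.mp ha2 with h | h
    · rw [hmGetD_insert, if_neg (by omega)]
      exact hcur a ha1 h
    · subst h
      rw [hmGetD_insert, if_pos rfl]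

lemma bOuter_fold (t : Int × Int) (d : Int) (m n : Nat) :
    ∀ (K S : Nat) (prev : Std.HashMap Int Int), S + K = m + n + 1 →
    (∀ a : Nat, S - 1 - n ≤ a → a ≤ min m (S - 1) → 1 ≤ S →
      prev.getD (a : Int) 0 = gval t d a (S - 1 - a)) →
    ((PySem.List.pyRange (S : Int) ((m : Int) + (n : Int) + 1) 1).foldl
      (fun prev s => (PySem.List.pyRange (max 0 (s - (n : Int))) (min (m : Int) s + 1) 1).foldl
        (bCell t d prev s) (∅ : Std.HashMap Int Int)) prev).getD (m : Int) 0 = gval t d m n := by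
  intro K
  induction K with
  | zero =>
    intro S prev hSK hprev
    have hS : S = m + n + 1 := by omega
    subst hS
    rw [PySem.List.pyRange_one_eq_nil (by push_cast; omega)]
    simp only [List.foldl_nil]
    have h := hprev m (by omega) (by omega) (by omega)
    rw [h]
    congr 1
    omega
  | succ K ih =>
    intro S prev hSK hprev
    have hS : S ≤ m + n := by omega
    rw [PySem.List.pyRange_one_cons (by push_cast; omega)]
    simp only [List.foldl_cons]
    have hmax : max 0 ((S : Int) - (n : Int)) = ((S - n : Nat) : Int) := by omega
    have hmin : min (m : Int) (S : Int) = ((min m S : Nat) : Int) := by omega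
    rw [hmax, hmin]
    have hstep := bDiag_fold t d m n S prev hprev
      (min m S + 1 - (S - n)) (S - n) (∅ : Std.HashMap Int Int)
      (le_refl _) (by omega) (by intro a _ ha; omega)
    have hc : ((S : Int) + 1) = ((S + 1 : Nat) : Int) := by push_cast; ring
    rw [hc]
    refine ih (S + 1) _ (by omega) ?_
    intro a ha1 ha2 _
    have h := hstep a (by omega) (by omega)
    rw [h]
    congr 1

lemma geo_index_alt_eq_gval (t : Int × Int) (d : Int) (m n : Nat) :
    geo_index_alt ((m : Int), (n : Int)) t d = gval t d m n := by
  unfold geo_index_alt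
  simp only []
  have h := bOuter_fold t d m n (m + n + 1) 0 (∅ : Std.HashMap Int Int) (by omega)
    (by intro a _ _ h; omega)
  simpa using h

-- ===== VERDICT (by name: the statement is the Claim_ definition above) =====
theorem geo_index_spec : Claim_equal_geo_index := by
  intro pos target depth _ hpre
  obtain ⟨m, hm⟩ := Int.eq_ofNat_of_zero_le hpre.1
  obtain ⟨n, hn⟩ := Int.eq_ofNat_of_zero_le hpre.2
  have hpos : pos = ((m : Int), (n : Int)) := by
    cases pos; simp_all
  unfold Spec_geo_index
  rw [hpos, geo_index_eq_gval, geo_index_alt_eq_gval]
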